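-- pv_equiv track=rewrite | github.com/ornfelt/dots | bin/my_scripts/2025/diff_dirs.py | compress_paths
-- ===== SOURCE A (Python) =====
-- def compress_paths(paths: list[str]) -> list[str]:
--     """
--     Mimic the awk "top-level only" logic:
--     - For each path, if it is a subpath of any already-added path (prev + "/"),
--       then skip it.
--     """
--     result: list[str] = []
--     for p in sorted(paths):
--         skip = False
--         for prev in result:
--             if p.startswith(prev + "/"):
--                 skip = True
--                 break
--         if not skip:
--             result.append(p)
--     return result
-- ===== SOURCE B (Python) =====
-- def compress_paths(paths: list[str]) -> list[str]:
--     """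
--     Same result as A: sort, keep p unless some already-kept path prev has
--     p.startswith(prev + "/").  Instead of scanning all kept paths for each p,
--     look up each slash-bounded prefix of p in a hash set of kept paths.
--     """
--     result: list[str] = []
--     kept: set[str] = set()
--     for p in sorted(paths):
--         if not any(p[i] == '/' and p[:i] in kept for i in range(len(p))):
--             result.append(p)
--             kept.add(p)
--     return result
-- ===== Notes on version B (the rewrite author's own statement) =====
-- stated objective: faster
-- what changed: Replaces A's inner scan of all previously kept paths (startswith against each) by O(1) hash-set lookups of each slash-bounded prefix of the current path, so the per-path cost no longer grows with the number of kept paths.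
import Mathlib
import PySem

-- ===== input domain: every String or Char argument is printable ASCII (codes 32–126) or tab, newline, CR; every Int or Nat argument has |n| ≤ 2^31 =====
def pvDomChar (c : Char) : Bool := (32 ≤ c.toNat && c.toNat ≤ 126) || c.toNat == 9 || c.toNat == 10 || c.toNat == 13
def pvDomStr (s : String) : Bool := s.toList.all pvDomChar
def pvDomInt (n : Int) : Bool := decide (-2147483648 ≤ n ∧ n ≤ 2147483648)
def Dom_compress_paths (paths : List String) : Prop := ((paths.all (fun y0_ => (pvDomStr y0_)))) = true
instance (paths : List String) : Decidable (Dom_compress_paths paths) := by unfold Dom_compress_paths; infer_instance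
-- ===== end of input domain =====

-- B replaces A's inner scan over all kept paths by hash-set lookups of each
-- slash-bounded prefix of p; return values proved equal on all inputs.

-- ===== PORT A =====
-- the inner 'for prev in result: … break' loop sets skip iff some prev matches: List.any
def compress_paths (paths : List String) : List String :=
  (PySem.List.sorted paths (fun x => x) false).foldl
    (fun result p =>
      if result.any (fun prev => PySem.Str.startswith p (prev ++ "/"))
      then result
      else result ++ [p]) []

-- ===== PORT B =====
def compress_paths_alt (paths : List String) : List String :=
  ((PySem.List.sorted paths (fun x => x) false).foldl
    (fun (st : List String × PySem.Set String) p =>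
      if (PySem.List.pyRange 0 (PySem.Str.len p) 1).any
           (fun i => (PySem.Str.pyGet? p i == some '/') &&
                     PySem.Set.contains st.2 (PySem.Str.slice p none (some i)))
      then st
      else (st.1 ++ [p], PySem.Set.add st.2 p))
    ([], PySem.Set.empty)).1

-- ===== PRECONDITION & SPEC =====
def Spec_compress_paths (paths : List String) (out : List String) : Prop := out = compress_paths_alt paths
instance (paths : List String) (out : List String) : Decidable (Spec_compress_paths paths out) := by unfold Spec_compress_paths; infer_instance

-- ===== CLAIM (what is proved, stated in full; the proofs are below) =====
def Claim_equal_compress_paths : Prop := ∀ (paths : List String), Dom_compress_paths paths → Spec_compress_paths paths (compress_paths paths)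

-- ===== LEMMAS AND PROOFS =====

-- a slash-bounded prefix read off an index: cs.take k ++ ['/'] is a prefix of cs iff cs[k] = '/'
theorem take_slash_prefix (cs : List Char) (k : Nat) (h : cs[k]? = some '/') :
    cs.take k ++ ['/'] <+: cs := by
  have h1 : cs.take (k+1) = cs.take k ++ ['/'] := by
    rw [List.take_add_one, h]; rfl
  rw [← h1]; exact List.take_prefix _ _

-- B's skip test (prefix lookups in the kept set) equals A's skip test (scan of the kept list)
theorem cond_eq (p : String) (acc kept : List String)
    (hmem : ∀ s, s ∈ kept ↔ s ∈ acc) :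
    ((PySem.List.pyRange 0 (PySem.Str.len p) 1).any
       (fun i => (PySem.Str.pyGet? p i == some '/') &&
                 PySem.Set.contains kept (PySem.Str.slice p none (some i))))
    = acc.any (fun prev => PySem.Str.startswith p (prev ++ "/")) := by
  rw [Bool.eq_iff_iff]
  simp only [List.any_eq_true, Bool.and_eq_true, beq_iff_eq,
    PySem.Set.contains_iff, PySem.List.mem_pyRange_one]
  constructor
  · rintro ⟨i, ⟨h0, hlt⟩, hget, hkept⟩
    obtain ⟨k, rfl⟩ : ∃ k : Nat, i = (k : Int) := ⟨i.toNat, (Int.toNat_of_nonneg h0).symm⟩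
    have hget' : p.toList[k]? = some '/' := by simpa using hget
    have hsl : PySem.Str.slice p none (some (k : Int)) = String.ofList (p.toList.take k) := by
      have ht : (PySem.Str.slice p none (some (k : Int))).toList = p.toList.take k := by
        simp [PySem.List.slice_to_natCast]
      rw [← ht, String.ofList_toList]
    refine ⟨_, (hmem _).mp (hsl ▸ hkept), ?_⟩
    simp only [PySem.Str.startswith_eq, PySem.Chars.startswith_iff]
    simpa using take_slash_prefix p.toList k hget'
  · rintro ⟨prev, hprev, hsw⟩
    rw [PySem.Str.startswith_eq, PySem.Chars.startswith_iff] at hsw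
    have hsw' : prev.toList ++ ['/'] <+: p.toList := by simpa using hsw
    obtain ⟨t, ht⟩ := hsw'
    refine ⟨(prev.toList.length : Int), ⟨by positivity, ?_⟩, ?_, ?_⟩
    · have hlen : prev.toList.length + 1 ≤ p.toList.length := by
        rw [← ht]; simp
      simp only [PySem.Str.len_eq]
      exact_mod_cast by omega
    · have : p.toList[prev.toList.length]? = some '/' := by
        rw [← ht, List.append_assoc, List.getElem?_append_right (le_refl _)]
        simp
      simpa using this
    · have hsl : PySem.Str.slice p none (some ((prev.toList.length : Nat) : Int))
          = String.ofList (p.toList.take prev.toList.length) := by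
        have ht2 : (PySem.Str.slice p none (some ((prev.toList.length : Nat) : Int))).toList
            = p.toList.take prev.toList.length := by
          simp [PySem.List.slice_to_natCast]
        rw [← ht2, String.ofList_toList]
      have htake : p.toList.take prev.toList.length = prev.toList := by
        rw [← ht, List.append_assoc]
        simp
      rw [hsl, htake, String.ofList_toList]
      exact (hmem _).mpr hprev

-- fold invariant: A's accumulator equals B's result component while kept holds the same members
theorem fold_eq (l : List String) (acc : List String) (kept : PySem.Set String)
    (hmem : ∀ s, s ∈ kept ↔ s ∈ acc) :
    l.foldl (fun result p =>
      if result.any (fun prev => PySem.Str.startswith p (prev ++ "/"))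
      then result else result ++ [p]) acc
    = (l.foldl (fun (st : List String × PySem.Set String) p =>
        if (PySem.List.pyRange 0 (PySem.Str.len p) 1).any
             (fun i => (PySem.Str.pyGet? p i == some '/') &&
                       PySem.Set.contains st.2 (PySem.Str.slice p none (some i)))
        then st
        else (st.1 ++ [p], PySem.Set.add st.2 p)) (acc, kept)).1 := by
  induction l generalizing acc kept with
  | nil => rfl
  | cons p l ih =>
    simp only [List.foldl_cons]
    rw [cond_eq p acc kept hmem]
    by_cases hc : acc.any (fun prev => PySem.Str.startswith p (prev ++ "/")) = true
    · rw [if_pos hc, if_pos hc]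
      exact ih acc kept hmem
    · rw [if_neg hc, if_neg hc]
      refine ih (acc ++ [p]) (PySem.Set.add kept p) (fun s => ?_)
      rw [PySem.Set.mem_add kept p s]
      simp [hmem s]

-- ===== VERDICT (by name: the statement is the Claim_ definition above) =====
theorem compress_paths_spec : Claim_equal_compress_paths := by
  intro paths _
  unfold Spec_compress_paths compress_paths compress_paths_alt
  exact fold_eq _ [] PySem.Set.empty (by simp [PySem.Set.empty])
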